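-- pv_equiv track=rewrite | github.com/ZhangYixin0618/Tic-Tac-Toe | BoardGame_Fun.py | win_Con_Gen
-- ===== SOURCE A (Python) =====
-- def win_Con_Gen(n):
--     win_con = []
--     for i in range(0, n):
--         win_con_ele = []
--         for j in range(0, n):
--             win_con_ele.append(n * j + i)
--         win_con.append(win_con_ele)
--
--     for i in range(0, n):
--         win_con_ele = []
--         for j in range(0, n):
--             win_con_ele.append(n * i + j)
--         win_con.append(win_con_ele)
--
--     win_con_ele = []
--     for i in range(0, n):
--         win_con_ele.append(n * i + i)
--     win_con.append(win_con_ele)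
--
--     win_con_ele = []
--     for i in range(1, n + 1):
--         win_con_ele.append((n - 1) * i)
--     win_con.append(win_con_ele)
--     return win_con
-- ===== SOURCE B (Python) =====
-- def win_Con_Gen(n):
--     # One sweep over the board with a running cell counter: each cell p is
--     # classified into its column bucket, its row bucket and (when it lies on
--     # one) a diagonal, instead of generating each win line by index arithmetic.
--     cols = [[] for _ in range(n)]
--     rows = [[] for _ in range(n)]
--     diag = []
--     anti = []
--     p = 0
--     for r in range(n):
--         for c in range(n):
--             cols[c].append(p)
--             rows[r].append(p)
--             if r == c:
--                 diag.append(p)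
--             if r + c == n - 1:
--                 anti.append(p)
--             p += 1
--     return cols + rows + [diag, anti]
-- ===== Notes on version B (the rewrite author's own statement) =====
-- stated objective: alternative
-- what changed: B makes one sweep over the board cells with a running counter, classifying each cell into its column bucket, row bucket and diagonal membership (cols[c]/rows[r]/r==c/r+c==n-1), instead of A's four separate per-line generation loops with index arithmetic n*j+i / n*i+j / n*i+i / (n-1)*i.
import Mathlib
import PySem

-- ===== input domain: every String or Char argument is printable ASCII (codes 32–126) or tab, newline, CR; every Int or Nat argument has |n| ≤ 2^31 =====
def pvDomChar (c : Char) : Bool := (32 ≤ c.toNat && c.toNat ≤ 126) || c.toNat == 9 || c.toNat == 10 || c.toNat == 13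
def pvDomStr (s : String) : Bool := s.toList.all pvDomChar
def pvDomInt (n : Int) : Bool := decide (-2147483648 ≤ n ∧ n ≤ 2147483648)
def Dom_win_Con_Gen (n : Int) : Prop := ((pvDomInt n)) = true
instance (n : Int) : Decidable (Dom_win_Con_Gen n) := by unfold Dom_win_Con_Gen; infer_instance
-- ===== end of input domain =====

-- B replaces A's four per-line generation loops by one sweep over the board cells
-- with a running counter, classifying each cell into its column/row/diagonal buckets.
-- Objective: alternative (same asymptotic cost, different algorithm).

-- ===== PORT A =====
def win_Con_Gen (n : Int) : List (List Int) :=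
  let wc1 := (PySem.List.pyRange 0 n 1).foldl (fun wc i =>
      wc ++ [(PySem.List.pyRange 0 n 1).foldl (fun e j => e ++ [n * j + i]) []]) []
  let wc2 := (PySem.List.pyRange 0 n 1).foldl (fun wc i =>
      wc ++ [(PySem.List.pyRange 0 n 1).foldl (fun e j => e ++ [n * i + j]) []]) wc1
  let d1 := (PySem.List.pyRange 0 n 1).foldl (fun e i => e ++ [n * i + i]) []
  let d2 := (PySem.List.pyRange 1 (n + 1) 1).foldl (fun e i => e ++ [(n - 1) * i]) []
  (wc2 ++ [d1]) ++ [d2]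

-- ===== PORT B =====
-- the sweep state: (cols, rows, diag, anti, p) — exactly Source B's five variables
abbrev pvSt := List (List Int) × List (List Int) × List Int × List Int × Int

-- the body of Source B's inner loop for cell (r, c) with counter p.
-- cols[c].append / rows[r].append: c and r come from range(n), so 0 ≤ c, r < n
-- = length of the bucket lists; .toNat and List.modify are exact for Python's
-- in-range nonnegative list indexing here.
def pvCell (n r : Int) (st : pvSt) (c : Int) : pvSt :=
  match st with
  | (cols, rows, diag, anti, p) =>
    (cols.modify c.toNat (· ++ [p]),
     rows.modify r.toNat (· ++ [p]),
     if r = c then diag ++ [p] else diag,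
     if r + c = n - 1 then anti ++ [p] else anti,
     p + 1)

def win_Con_Gen_alt (n : Int) : List (List Int) :=
  let init : pvSt := ((PySem.List.pyRange 0 n 1).map (fun _ => []),
                      (PySem.List.pyRange 0 n 1).map (fun _ => []), [], [], 0)
  let st := (PySem.List.pyRange 0 n 1).foldl
      (fun st r => (PySem.List.pyRange 0 n 1).foldl (pvCell n r) st) init
  st.1 ++ st.2.1 ++ [st.2.2.1, st.2.2.2.1]

-- ===== PRECONDITION & SPEC =====
def Spec_win_Con_Gen (n : Int) (out : List (List Int)) : Prop := out = win_Con_Gen_alt n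
instance (n : Int) (out : List (List Int)) : Decidable (Spec_win_Con_Gen n out) := by unfold Spec_win_Con_Gen; infer_instance

-- ===== CLAIM (what is proved, stated in full; the proofs are below) =====
def Claim_equal_win_Con_Gen : Prop := ∀ (n : Int), Dom_win_Con_Gen n → Spec_win_Con_Gen n (win_Con_Gen n)

-- ===== LEMMAS AND PROOFS =====

-- invariant of Source B's INNER loop: after the first k cells of row r, each of the
-- first k column buckets and the r-th row bucket gained the cell counter values,
-- the diagonals gained their (at most one) cell of this row prefix, p advanced by k
theorem pv_inner (m : Nat) (r : Int) (hr : 0 ≤ r) (hrm : r < (m : Int))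
    (g g2 : Nat → List Int) (diag0 anti0 : List Int) (p0 : Int) (k : Nat) (hk : k ≤ m) :
    ((List.range k).map (Nat.cast : Nat → Int)).foldl (pvCell (m : Int) r)
        ((List.range m).map g, (List.range m).map g2, diag0, anti0, p0)
    = ((List.range m).map (fun (c : Nat) => if c < k then g c ++ [p0 + (c : Int)] else g c),
       (List.range m).map (fun (i : Nat) => if (i : Int) = r then
            g2 i ++ (List.range k).map (fun (c : Nat) => p0 + (c : Int)) else g2 i),
       (if r < (k : Int) then diag0 ++ [p0 + r] else diag0),
       (if (m : Int) - 1 - r < (k : Int) then anti0 ++ [p0 + ((m : Int) - 1 - r)] else anti0),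
       p0 + (k : Int)) := by
  induction k with
  | zero =>
    simp only [List.range_zero, List.map_nil, List.foldl_nil, Prod.mk.injEq]
    refine ⟨?_, ?_, ?_, ?_, ?_⟩
    · exact (List.map_congr_left (fun c _ => by simp)).symm
    · exact (List.map_congr_left (fun i _ => by simp)).symm
    · exact (if_neg (by push_cast; omega)).symm
    · exact (if_neg (by push_cast; omega)).symm
    · push_cast; ring
  | succ k ih =>
    have hk' : k ≤ m := by omega
    rw [List.range_succ, List.map_append, List.foldl_append, ih hk']
    simp only [List.map_cons, List.map_nil, List.foldl_cons, List.foldl_nil, pvCell,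
      Prod.mk.injEq]
    refine ⟨?_, ?_, ?_, ?_, ?_⟩
    · -- cols
      apply List.ext_getElem
      · simp
      · intro j h1 h2
        have hjm : j < m := by simpa using h2
        rw [List.getElem_modify]
        simp only [Int.toNat_natCast, List.getElem_map, List.getElem_range]
        by_cases hjk : k = j
        · subst hjk
          simp
        · rw [if_neg hjk]
          by_cases h3 : j < k
          · rw [if_pos h3, if_pos (by omega)]
          · rw [if_neg h3, if_neg (by omega)]
    · -- rows
      apply List.ext_getElem
      · simp
      · intro j h1 h2
        have hjm : j < m := by simpa using h2
        rw [List.getElem_modify]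
        simp only [List.getElem_map, List.getElem_range]
        by_cases hjr : r.toNat = j
        · have hjr' : (j : Int) = r := by omega
          rw [if_pos hjr, if_pos hjr', if_pos hjr']
          simp [List.append_assoc]
        · have hjr' : ¬ (j : Int) = r := by omega
          rw [if_neg hjr, if_neg hjr', if_neg hjr']
    · -- diag
      by_cases hrk : r = (k : Int)
      · rw [if_pos hrk, if_neg (by omega), if_pos (by omega), hrk]
      · rw [if_neg hrk]
        by_cases h3 : r < (k : Int)
        · rw [if_pos h3, if_pos (by push_cast; omega)]
        · rw [if_neg h3, if_neg (by push_cast; omega)]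
    · -- anti
      by_cases hrk : r + (k : Int) = (m : Int) - 1
      · rw [if_pos hrk, if_neg (by omega), if_pos (by push_cast; omega)]
        have h4 : (m : Int) - 1 - r = (k : Int) := by omega
        rw [h4]
      · rw [if_neg hrk]
        by_cases h3 : (m : Int) - 1 - r < (k : Int)
        · rw [if_pos h3, if_pos (by push_cast; omega)]
        · rw [if_neg h3, if_neg (by push_cast; omega)]
    · -- p
      push_cast; ring

-- invariant of Source B's OUTER loop: after R full rows, each column bucket holds its
-- first R cells, the first R row buckets are complete, diagonals hold R cells, p = n*R
theorem pv_outer (m R : Nat) (hR : R ≤ m) :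
    ((List.range R).map (Nat.cast : Nat → Int)).foldl
        (fun st r => ((List.range m).map (Nat.cast : Nat → Int)).foldl (pvCell (m : Int) r) st)
        ((List.range m).map (fun _ => ([] : List Int)),
         (List.range m).map (fun _ => ([] : List Int)), [], [], 0)
    = ((List.range m).map (fun (c : Nat) =>
            (List.range R).map (fun (r : Nat) => (m : Int) * (r : Int) + (c : Int))),
       (List.range m).map (fun (i : Nat) => if i < R then
            (List.range m).map (fun (c : Nat) => (m : Int) * (i : Int) + (c : Int)) else []),
       (List.range R).map (fun (r : Nat) => (m : Int) * (r : Int) + (r : Int)),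
       (List.range R).map (fun (r : Nat) =>
            (m : Int) * (r : Int) + ((m : Int) - 1 - (r : Int))),
       (m : Int) * (R : Int)) := by
  induction R with
  | zero => simp
  | succ R ih =>
    have hR' : R ≤ m := by omega
    have hRm : R < m := by omega
    rw [List.range_succ, List.map_append, List.foldl_append, ih hR']
    simp only [List.map_cons, List.map_nil, List.foldl_cons, List.foldl_nil]
    rw [pv_inner m (R : Int) (by positivity) (by exact_mod_cast hRm)
      (fun (c : Nat) => (List.range R).map (fun (r : Nat) => (m : Int) * (r : Int) + (c : Int)))
      (fun (i : Nat) => if i < R then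
          (List.range m).map (fun (c : Nat) => (m : Int) * (i : Int) + (c : Int)) else [])
      _ _ ((m : Int) * (R : Int)) m le_rfl]
    simp only [Prod.mk.injEq]
    refine ⟨?_, ?_, ?_, ?_, ?_⟩
    · -- cols
      apply List.map_congr_left
      intro c hc
      rw [List.mem_range] at hc
      rw [if_pos hc]
      simp
    · -- rows
      apply List.map_congr_left
      intro i hi
      by_cases hiR : i = R
      · subst hiR
        rw [if_pos rfl, if_neg (by omega), if_pos (by omega), List.nil_append]
      · have h5 : ¬ (i : Int) = (R : Int) := by exact_mod_cast hiR
        rw [if_neg h5]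
        by_cases h3 : i < R
        · rw [if_pos h3, if_pos (by omega)]
        · rw [if_neg h3, if_neg (by omega)]
    · -- diag
      rw [if_pos (by exact_mod_cast hRm)]
      simp
    · -- anti
      rw [if_pos (by omega)]
      simp
    · -- p
      push_cast; ring

-- ===== VERDICT (by name: the statement is the Claim_ definition above) =====
theorem win_Con_Gen_spec : Claim_equal_win_Con_Gen := by
  intro n _
  unfold Spec_win_Con_Gen win_Con_Gen win_Con_Gen_alt
  by_cases hn : 0 < n
  · set m := n.toNat with hmdef
    have hm : n = ((m : Nat) : Int) := by omega
    have hrange : PySem.List.pyRange 0 n 1 = (List.range m).map (Nat.cast : Nat → Int) := by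
      rw [PySem.List.pyRange_one]
      have h0 : (n - 0).toNat = m := by omega
      rw [h0]
      exact List.map_congr_left (fun k _ => by omega)
    simp only [PySem.List.foldl_append_singleton_eq_map, List.nil_append]
    rw [hrange, hm]
    simp only [List.map_map, Function.comp_def]
    rw [pv_outer m m le_rfl]
    simp only [List.append_assoc, List.singleton_append]
    congr 1
    congr 1
    · -- rows: every index of range m is < m
      apply List.map_congr_left
      intro i hi
      rw [List.mem_range] at hi
      rw [if_pos hi]
    congr 1
    -- anti-diagonal: Source B's cells with r + c = n - 1 vs A's (n-1)*i for i in 1..n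
    rw [PySem.List.pyRange_one 1 (((m : Nat) : Int) + 1)]
    have h1 : ((((m : Nat) : Int) + 1) - 1).toNat = m := by omega
    rw [List.map_map, Function.comp_def, h1]
    congr 1
    apply List.map_congr_left
    intro k _
    ring
  · -- n ≤ 0: all ranges are empty, both return [[], []]
    have h0 : PySem.List.pyRange 0 n 1 = [] := PySem.List.pyRange_one_eq_nil (by omega)
    have h1 : PySem.List.pyRange 1 (n + 1) 1 = [] := PySem.List.pyRange_one_eq_nil (by omega)
    rw [h0, h1]
    simp
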